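-- pv_equiv track=rewrite | github.com/wyk18703232953/myResearch | codeComplex/data/filteredData/python/nlogn/python_nlogn_0234.py | check
-- ===== SOURCE A (Python) =====
-- import math
--
-- def get_line(x1, y1, x2, y2):
--     a = x2 - x1
--     b = y1 - y2
--     c = x1 * (y2 - y1) - y1 * (x2 - x1)
--     g = math.gcd(math.gcd(a, b), c)
--     if g != 0:
--         a //= g
--         b //= g
--         c //= g
--     return a, b, c
--
-- def check(x1, y1, x2, y2, xy):
--     a1, b1, c1 = get_line(x1, y1, x2, y2)
--     other_point = None
--     cnt_other = 0
--     a2, b2, c2 = 0, 0, 0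
--     for i in range(len(xy)):
--         x, y = xy[i]
--         if a1 * y + b1 * x + c1 != 0:
--             if other_point is None:
--                 other_point = (x, y)
--                 cnt_other = 1
--             elif cnt_other == 1:
--                 cnt_other = 2
--                 a2, b2, c2 = get_line(other_point[0], other_point[1], x, y)
--             else:
--                 if a2 * y + b2 * x + c2 != 0:
--                     return False
--     return True
-- ===== SOURCE B (Python) =====
-- import math
--
-- def get_line(x1, y1, x2, y2):
--     a = x2 - x1
--     b = y1 - y2
--     c = x1 * (y2 - y1) - y1 * (x2 - x1)
--     g = math.gcd(math.gcd(a, b), c)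
--     if g != 0:
--         a //= g
--         b //= g
--         c //= g
--     return a, b, c
--
-- def check(x1, y1, x2, y2, xy):
--     a1, b1, c1 = get_line(x1, y1, x2, y2)
--     off = [(x, y) for x, y in xy if a1 * y + b1 * x + c1 != 0]
--     if len(off) <= 2:
--         return True
--     a2, b2, c2 = get_line(off[0][0], off[0][1], off[1][0], off[1][1])
--     return all(a2 * y + b2 * x + c2 == 0 for x, y in off[2:])
-- ===== Notes on version B (the rewrite author's own statement) =====
-- stated objective: simpler
-- what changed: Replaced the interleaved flag/counter state machine (other_point, cnt_other, mutable line coefficients, early return) by two shaped passes: filter the points off line 1, then check collinearity of the remaining off-line points against the line through the first two of them.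
import Mathlib
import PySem

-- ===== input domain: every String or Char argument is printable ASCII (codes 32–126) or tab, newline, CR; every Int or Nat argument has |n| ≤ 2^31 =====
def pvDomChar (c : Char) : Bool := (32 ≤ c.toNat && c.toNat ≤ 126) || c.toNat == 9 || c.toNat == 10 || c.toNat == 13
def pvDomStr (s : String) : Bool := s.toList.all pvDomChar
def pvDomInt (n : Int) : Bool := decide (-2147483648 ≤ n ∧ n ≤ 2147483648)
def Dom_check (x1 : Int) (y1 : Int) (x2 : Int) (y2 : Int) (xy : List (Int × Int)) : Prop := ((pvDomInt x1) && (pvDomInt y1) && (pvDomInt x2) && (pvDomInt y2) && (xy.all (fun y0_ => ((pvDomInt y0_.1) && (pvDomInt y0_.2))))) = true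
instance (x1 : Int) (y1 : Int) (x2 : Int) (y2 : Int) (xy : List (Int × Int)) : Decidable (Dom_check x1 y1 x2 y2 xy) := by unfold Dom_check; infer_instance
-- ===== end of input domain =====

-- B replaces A's flag/counter state machine with a filter pass plus a collinearity pass (simpler decomposition; same cost).


-- ===== PORT A =====
-- shared helper (both Pythons contain the identical get_line); math.gcd is nonnegative, '//' is Python floor division
def getLine (x1 y1 x2 y2 : Int) : Int × Int × Int :=
  let a := x2 - x1
  let b := y1 - y2
  let c := x1 * (y2 - y1) - y1 * (x2 - x1)
  let g : Int := Int.gcd (Int.gcd a b) c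
  if g ≠ 0 then (PySem.Int.floordiv a g, PySem.Int.floordiv b g, PySem.Int.floordiv c g)
  else (a, b, c)

-- A's loop, step for step: state = (other_point, cnt_other, a2, b2, c2), early return False
def checkLoop (a1 b1 c1 : Int) (op : Option (Int × Int)) (cnt a2 b2 c2 : Int) :
    List (Int × Int) → Bool
  | [] => true
  | (x, y) :: rest =>
    if a1 * y + b1 * x + c1 ≠ 0 then
      match op with
      | none => checkLoop a1 b1 c1 (some (x, y)) 1 a2 b2 c2 rest
      | some p =>
        if cnt = 1 then
          match getLine p.1 p.2 x y with
          | (a2', b2', c2') => checkLoop a1 b1 c1 (some p) 2 a2' b2' c2' rest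
        else
          if a2 * y + b2 * x + c2 ≠ 0 then false
          else checkLoop a1 b1 c1 (some p) cnt a2 b2 c2 rest
    else checkLoop a1 b1 c1 op cnt a2 b2 c2 rest

def check (x1 : Int) (y1 : Int) (x2 : Int) (y2 : Int) (xy : List (Int × Int)) : Bool :=
  match getLine x1 y1 x2 y2 with
  | (a1, b1, c1) => checkLoop a1 b1 c1 none 0 0 0 0 xy

-- ===== PORT B =====
def check_alt (x1 : Int) (y1 : Int) (x2 : Int) (y2 : Int) (xy : List (Int × Int)) : Bool :=
  match getLine x1 y1 x2 y2 with
  | (a1, b1, c1) =>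
    let off := xy.filter (fun p => a1 * p.2 + b1 * p.1 + c1 ≠ 0)
    match off with
    | p :: q :: rest =>
      match getLine p.1 p.2 q.1 q.2 with
      | (a2, b2, c2) => rest.all (fun r => a2 * r.2 + b2 * r.1 + c2 = 0)
    | _ => true

-- ===== PRECONDITION & SPEC =====
def Spec_check (x1 : Int) (y1 : Int) (x2 : Int) (y2 : Int) (xy : List (Int × Int)) (out : Bool) : Prop := out = check_alt x1 y1 x2 y2 xy
instance (x1 : Int) (y1 : Int) (x2 : Int) (y2 : Int) (xy : List (Int × Int)) (out : Bool) : Decidable (Spec_check x1 y1 x2 y2 xy out) := by unfold Spec_check; infer_instance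

-- ===== CLAIM (what is proved, stated in full; the proofs are below) =====
def Claim_equal_check : Prop := ∀ (x1 : Int) (y1 : Int) (x2 : Int) (y2 : Int) (xy : List (Int × Int)), Dom_check x1 y1 x2 y2 xy → Spec_check x1 y1 x2 y2 xy (check x1 y1 x2 y2 xy)

-- ===== LEMMAS AND PROOFS =====
-- state cnt ≠ 1 with a line already fixed: A just checks every remaining off-line point
theorem loop_two (a1 b1 c1 a2 b2 c2 cnt : Int) (p : Int × Int) (hc : cnt ≠ 1)
    (xs : List (Int × Int)) :
    checkLoop a1 b1 c1 (some p) cnt a2 b2 c2 xs =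
      (xs.filter (fun r => a1 * r.2 + b1 * r.1 + c1 ≠ 0)).all
        (fun r => a2 * r.2 + b2 * r.1 + c2 = 0) := by
  induction xs with
  | nil => rfl
  | cons hd tl ih =>
    obtain ⟨x, y⟩ := hd
    by_cases h : a1 * y + b1 * x + c1 ≠ 0
    · have hL : checkLoop a1 b1 c1 (some p) cnt a2 b2 c2 ((x, y) :: tl)
          = if a2 * y + b2 * x + c2 ≠ 0 then false
            else checkLoop a1 b1 c1 (some p) cnt a2 b2 c2 tl := by
        simp [checkLoop, h, hc]
      have hf : List.filter (fun r => decide (a1 * r.2 + b1 * r.1 + c1 ≠ 0)) ((x, y) :: tl)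
          = (x, y) :: List.filter (fun r => decide (a1 * r.2 + b1 * r.1 + c1 ≠ 0)) tl := by
        simp [List.filter, h]
      rw [hL, hf, List.all_cons]
      by_cases h2 : a2 * y + b2 * x + c2 ≠ 0
      · simp [h2]
      · rw [if_neg h2, ih]
        simp only [ne_eq, not_not] at h2
        simp [h2]
    · have hL : checkLoop a1 b1 c1 (some p) cnt a2 b2 c2 ((x, y) :: tl)
          = checkLoop a1 b1 c1 (some p) cnt a2 b2 c2 tl := by
        simp [checkLoop, h]
      have hf : List.filter (fun r => decide (a1 * r.2 + b1 * r.1 + c1 ≠ 0)) ((x, y) :: tl)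
          = List.filter (fun r => decide (a1 * r.2 + b1 * r.1 + c1 ≠ 0)) tl := by
        simp [List.filter, h]
      rw [hL, hf, ih]

-- state cnt = 1: the next off-line point fixes the line, the rest is checked
theorem loop_one (a1 b1 c1 a2 b2 c2 : Int) (p : Int × Int) (xs : List (Int × Int)) :
    checkLoop a1 b1 c1 (some p) 1 a2 b2 c2 xs =
      (match xs.filter (fun r => a1 * r.2 + b1 * r.1 + c1 ≠ 0) with
       | [] => true
       | q :: rest =>
         match getLine p.1 p.2 q.1 q.2 with
         | (a2', b2', c2') => rest.all (fun r => a2' * r.2 + b2' * r.1 + c2' = 0)) := by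
  induction xs with
  | nil => rfl
  | cons hd tl ih =>
    obtain ⟨x, y⟩ := hd
    by_cases h : a1 * y + b1 * x + c1 ≠ 0
    · have hL : checkLoop a1 b1 c1 (some p) 1 a2 b2 c2 ((x, y) :: tl)
          = match getLine p.1 p.2 x y with
            | (a2', b2', c2') => checkLoop a1 b1 c1 (some p) 2 a2' b2' c2' tl := by
        simp [checkLoop, h]
      have hf : List.filter (fun r => decide (a1 * r.2 + b1 * r.1 + c1 ≠ 0)) ((x, y) :: tl)
          = (x, y) :: List.filter (fun r => decide (a1 * r.2 + b1 * r.1 + c1 ≠ 0)) tl := by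
        simp [List.filter, h]
      rw [hL, hf]
      show (match getLine p.1 p.2 x y with
            | (a2', b2', c2') => checkLoop a1 b1 c1 (some p) 2 a2' b2' c2' tl)
          = (match getLine p.1 p.2 x y with
             | (a2', b2', c2') =>
               (List.filter (fun r => decide (a1 * r.2 + b1 * r.1 + c1 ≠ 0)) tl).all
                 (fun r => decide (a2' * r.2 + b2' * r.1 + c2' = 0)))
      rcases hG : getLine p.1 p.2 x y with ⟨a2', b2', c2'⟩
      exact loop_two a1 b1 c1 a2' b2' c2' 2 p (by norm_num) tl
    · have hL : checkLoop a1 b1 c1 (some p) 1 a2 b2 c2 ((x, y) :: tl)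
          = checkLoop a1 b1 c1 (some p) 1 a2 b2 c2 tl := by
        simp [checkLoop, h]
      have hf : List.filter (fun r => decide (a1 * r.2 + b1 * r.1 + c1 ≠ 0)) ((x, y) :: tl)
          = List.filter (fun r => decide (a1 * r.2 + b1 * r.1 + c1 ≠ 0)) tl := by
        simp [List.filter, h]
      rw [hL, hf, ih]

-- initial state: the filtered list drives everything
theorem loop_zero (a1 b1 c1 a2 b2 c2 : Int) (xs : List (Int × Int)) :
    checkLoop a1 b1 c1 none 0 a2 b2 c2 xs =
      (match xs.filter (fun r => a1 * r.2 + b1 * r.1 + c1 ≠ 0) with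
       | p :: q :: rest =>
         match getLine p.1 p.2 q.1 q.2 with
         | (a2', b2', c2') => rest.all (fun r => a2' * r.2 + b2' * r.1 + c2' = 0)
       | _ => true) := by
  induction xs with
  | nil => rfl
  | cons hd tl ih =>
    obtain ⟨x, y⟩ := hd
    by_cases h : a1 * y + b1 * x + c1 ≠ 0
    · have hL : checkLoop a1 b1 c1 none 0 a2 b2 c2 ((x, y) :: tl)
          = checkLoop a1 b1 c1 (some (x, y)) 1 a2 b2 c2 tl := by
        simp [checkLoop, h]
      have hf : List.filter (fun r => decide (a1 * r.2 + b1 * r.1 + c1 ≠ 0)) ((x, y) :: tl)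
          = (x, y) :: List.filter (fun r => decide (a1 * r.2 + b1 * r.1 + c1 ≠ 0)) tl := by
        simp [List.filter, h]
      rw [hL, hf, loop_one]
      rcases hq : List.filter (fun r => decide (a1 * r.2 + b1 * r.1 + c1 ≠ 0)) tl with _ | ⟨q, rest⟩
      · rw [hq]
      · rw [hq]
    · have hL : checkLoop a1 b1 c1 none 0 a2 b2 c2 ((x, y) :: tl)
          = checkLoop a1 b1 c1 none 0 a2 b2 c2 tl := by
        simp [checkLoop, h]
      have hf : List.filter (fun r => decide (a1 * r.2 + b1 * r.1 + c1 ≠ 0)) ((x, y) :: tl)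
          = List.filter (fun r => decide (a1 * r.2 + b1 * r.1 + c1 ≠ 0)) tl := by
        simp [List.filter, h]
      rw [hL, hf, ih]

-- ===== VERDICT (by name: the statement is the Claim_ definition above) =====
theorem check_spec : Claim_equal_check := by
  intro x1 y1 x2 y2 xy _
  unfold Spec_check check check_alt
  rcases getLine x1 y1 x2 y2 with ⟨a1, b1, c1⟩
  exact loop_zero a1 b1 c1 0 0 0 xy
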